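-- pv_equiv track=rewrite | github.com/kkeian/grade_estimator | main.py | getMaxCatAndWeight
-- ===== SOURCE A (Python) =====
-- def getMaxCatAndWeight(cats: dict[str], gradeCats: list[str]):
--     maxCatAndWeight = ("",0)
--
--     for cat, weight in cats.items():
--         if cat not in gradeCats:
--             continue
--         if weight > maxCatAndWeight[1]:
--             maxCatAndWeight = (cat, weight)
--
--     return maxCatAndWeight
-- ===== SOURCE B (Python) =====
-- def getMaxCatAndWeight(cats: dict[str], gradeCats: list[str]):
--     for cat, weight in sorted(cats.items(), key=lambda kv: kv[1], reverse=True):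
--         if cat in gradeCats and weight > 0:
--             return (cat, weight)
--     return ("", 0)
-- ===== Notes on version B (the rewrite author's own statement) =====
-- stated objective: alternative
-- what changed: Replaces A's single-pass running-max loop with a sort-then-scan: stable-sort the items by weight descending, then return the first pair whose category is in gradeCats with positive weight (stability reproduces A's first-encountered tie-breaking), defaulting to ('',0).
import Mathlib
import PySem

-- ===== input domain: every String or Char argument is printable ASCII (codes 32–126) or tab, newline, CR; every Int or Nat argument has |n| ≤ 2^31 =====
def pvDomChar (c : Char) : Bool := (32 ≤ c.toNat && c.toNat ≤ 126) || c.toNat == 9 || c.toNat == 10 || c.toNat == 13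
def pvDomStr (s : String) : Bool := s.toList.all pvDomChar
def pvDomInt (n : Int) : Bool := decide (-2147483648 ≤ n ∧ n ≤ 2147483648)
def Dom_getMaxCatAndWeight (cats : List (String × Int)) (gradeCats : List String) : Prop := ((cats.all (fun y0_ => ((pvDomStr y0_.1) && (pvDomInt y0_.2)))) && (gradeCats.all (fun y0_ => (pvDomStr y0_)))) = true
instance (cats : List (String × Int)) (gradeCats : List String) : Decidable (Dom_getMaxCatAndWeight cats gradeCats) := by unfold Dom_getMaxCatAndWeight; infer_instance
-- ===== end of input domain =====

-- B replaces A's running-max loop by a stable sort of the items by weight descending followed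
-- by returning the first eligible positive-weight pair (alternative sort-then-scan algorithm;
-- stability reproduces A's first-encountered tie-breaking).

-- ===== PORT A =====
def getMaxCatAndWeight (cats : List (String × Int)) (gradeCats : List String) : String × Int :=
  cats.foldl
    (fun acc cw =>
      if ¬ (gradeCats.contains cw.1) then acc
      else if cw.2 > acc.2 then cw else acc)
    ("", 0)

-- ===== PORT B =====
def getMaxCatAndWeight_alt (cats : List (String × Int)) (gradeCats : List String) : String × Int :=
  ((PySem.List.sorted cats (fun cw => cw.2) true).find?
      (fun cw => gradeCats.contains cw.1 && decide (cw.2 > 0))).getD ("", 0)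

-- ===== PRECONDITION & SPEC =====
def Spec_getMaxCatAndWeight (cats : List (String × Int)) (gradeCats : List String) (out : String × Int) : Prop := out = getMaxCatAndWeight_alt cats gradeCats
instance (cats : List (String × Int)) (gradeCats : List String) (out : String × Int) : Decidable (Spec_getMaxCatAndWeight cats gradeCats out) := by unfold Spec_getMaxCatAndWeight; infer_instance

-- ===== CLAIM (what is proved, stated in full; the proofs are below) =====
def Claim_equal_getMaxCatAndWeight : Prop := ∀ (cats : List (String × Int)) (gradeCats : List String), Dom_getMaxCatAndWeight cats gradeCats → Spec_getMaxCatAndWeight cats gradeCats (getMaxCatAndWeight cats gradeCats)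

-- ===== LEMMAS AND PROOFS =====

-- A's loop step.
def pvStepA (gradeCats : List String) (acc cw : String × Int) : String × Int :=
  if ¬ (gradeCats.contains cw.1) then acc
  else if cw.2 > acc.2 then cw else acc

-- first-maximum-by-weight fold step (first maximum wins).
def pvStepM (acc : Option (String × Int)) (cw : String × Int) : Option (String × Int) :=
  match acc with
  | none => some cw
  | some m => if m.2 < cw.2 then some cw else some m

theorem pv_stepA_not_mem (gradeCats : List String) (acc cw : String × Int)
    (hm : ¬ gradeCats.contains cw.1) : pvStepA gradeCats acc cw = acc := by
  unfold pvStepA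
  rw [if_pos hm]

theorem pv_stepA_mem_lt (gradeCats : List String) (acc cw : String × Int)
    (hm : gradeCats.contains cw.1) (h : acc.2 < cw.2) : pvStepA gradeCats acc cw = cw := by
  unfold pvStepA
  rw [if_neg (not_not_intro hm), if_pos h]

theorem pv_stepA_mem_le (gradeCats : List String) (acc cw : String × Int)
    (hm : gradeCats.contains cw.1) (h : ¬ acc.2 < cw.2) : pvStepA gradeCats acc cw = acc := by
  unfold pvStepA
  rw [if_neg (not_not_intro hm), if_neg h]

theorem pv_filter_cons_neg (gradeCats : List String) (x : String × Int) (t : List (String × Int))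
    (h : ¬ (gradeCats.contains x.1 && decide (x.2 > 0)) = true) :
    (x :: t).filter (fun cw => gradeCats.contains cw.1 && decide (cw.2 > 0))
      = t.filter (fun cw => gradeCats.contains cw.1 && decide (cw.2 > 0)) := by
  simp only [List.filter_cons]
  rw [if_neg h]

-- Once the accumulator holds a nonnegative weight, A's loop over t equals the first-max fold over the filtered t.
theorem pv_some_phase (gradeCats : List String) (t : List (String × Int)) :
    ∀ acc : String × Int, 0 ≤ acc.2 →
      List.foldl pvStepM (some acc)
        (t.filter (fun cw => gradeCats.contains cw.1 && decide (cw.2 > 0)))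
      = some (t.foldl (pvStepA gradeCats) acc) := by
  induction t with
  | nil => intro acc _; simp
  | cons x t ih =>
    intro acc hacc
    by_cases hel : (gradeCats.contains x.1 && decide (x.2 > 0)) = true
    · have hm : gradeCats.contains x.1 = true := by
        simpa using (Bool.and_elim_left hel)
      have hw : (0 : Int) < x.2 := by
        have := Bool.and_elim_right hel; simpa using this
      simp only [List.filter_cons, hel, if_pos, List.foldl_cons]
      by_cases hlt : acc.2 < x.2
      · rw [show pvStepM (some acc) x = some x by simp [pvStepM, hlt],
            pv_stepA_mem_lt gradeCats acc x hm hlt]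
        exact ih x (le_of_lt hw)
      · rw [show pvStepM (some acc) x = some acc by simp [pvStepM, hlt],
            pv_stepA_mem_le gradeCats acc x hm hlt]
        exact ih acc hacc
    · rw [pv_filter_cons_neg gradeCats x t hel, List.foldl_cons]
      by_cases hm : gradeCats.contains x.1
      · have hw : ¬ acc.2 < x.2 := by
          have : ¬ (0 : Int) < x.2 := by
            intro h; exact hel (by rw [hm]; simpa using h)
          omega
        rw [pv_stepA_mem_le gradeCats acc x hm hw]
        exact ih acc hacc
      · rw [pv_stepA_not_mem gradeCats acc x hm]
        exact ih acc hacc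

-- A's whole loop equals the first-max fold over the eligible (in-gradeCats, positive-weight) items.
theorem pv_a_eq_maxfold (gradeCats : List String) (cats : List (String × Int)) :
    cats.foldl (pvStepA gradeCats) ("", 0)
      = (List.foldl pvStepM none
          (cats.filter (fun cw => gradeCats.contains cw.1 && decide (cw.2 > 0)))).getD ("", 0) := by
  induction cats with
  | nil => simp
  | cons x t ih =>
    by_cases hel : (gradeCats.contains x.1 && decide (x.2 > 0)) = true
    · have hm : gradeCats.contains x.1 = true := by
        simpa using (Bool.and_elim_left hel)
      have hw : (0 : Int) < x.2 := by
        have := Bool.and_elim_right hel; simpa using this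
      simp only [List.filter_cons, hel, if_pos, List.foldl_cons]
      rw [show pvStepM none x = some x from rfl,
          pv_stepA_mem_lt gradeCats ("", 0) x hm hw,
          pv_some_phase gradeCats t x (le_of_lt hw)]
      simp
    · rw [pv_filter_cons_neg gradeCats x t hel, List.foldl_cons]
      by_cases hm : gradeCats.contains x.1
      · have hw : ¬ ((0 : Int) < x.2) := by
          intro h; exact hel (by rw [hm]; simpa using h)
        rw [pv_stepA_mem_le gradeCats ("", 0) x hm hw]
        exact ih
      · rw [pv_stepA_not_mem gradeCats ("", 0) x hm]
        exact ih

-- Inserting x into a weight-descending list s: the first p-hit of the result is the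
-- first-max update of the first p-hit of s by x (when p x) — the stability step.
theorem pv_find_insertBy (p : String × Int → Bool) (x : String × Int) :
    ∀ s : List (String × Int), s.Pairwise (fun a b => b.2 ≤ a.2) →
      (PySem.List.insertBy (fun a b => decide (b.2 < a.2)) x s).find? p
        = if p x then pvStepM (s.find? p) x else s.find? p := by
  intro s
  induction s with
  | nil =>
    intro _
    by_cases hx : p x <;> simp [PySem.List.insertBy, pvStepM, hx]
  | cons y t ih =>
    intro hp
    have hpt : t.Pairwise (fun a b => b.2 ≤ a.2) := (List.pairwise_cons.mp hp).2
    have hyt : ∀ m ∈ t, m.2 ≤ y.2 := (List.pairwise_cons.mp hp).1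
    by_cases hb : (y.2 < x.2)
    · -- x goes in front
      have : PySem.List.insertBy (fun a b => decide (b.2 < a.2)) x (y :: t)
          = x :: y :: t := by
        simp [PySem.List.insertBy, hb]
      rw [this]
      by_cases hx : p x
      · -- any p-hit m in y::t has m.2 ≤ y.2 < x.2, so pvStepM picks x
        rw [if_pos hx]
        cases hfind : (y :: t).find? p with
        | none => simp [hx, hfind, pvStepM]
        | some m =>
          have hm : m ∈ y :: t := List.mem_of_find?_eq_some hfind
          have hle : m.2 ≤ y.2 := by
            rcases List.mem_cons.mp hm with h | h
            · rw [h]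
            · exact hyt m h
          have : m.2 < x.2 := lt_of_le_of_lt hle hb
          simp [List.find?_cons, hx, hfind, pvStepM, this]
      · simp [List.find?_cons, hx]
    · -- x goes after y
      have : PySem.List.insertBy (fun a b => decide (b.2 < a.2)) x (y :: t)
          = y :: PySem.List.insertBy (fun a b => decide (b.2 < a.2)) x t := by
        simp [PySem.List.insertBy, hb]
      rw [this]
      by_cases hy : p y
      · -- y stays the first hit; if p x then pvStepM keeps y since ¬ y.2 < x.2
        by_cases hx : p x
        · simp [hy, hx, pvStepM, hb]
        · simp [hy, hx]
      · rw [List.find?_cons_of_neg (by simpa using hy), ih hpt,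
            List.find?_cons_of_neg (by simpa using hy)]
-- The stability theorem: the first eligible element of the stable weight-descending sort
-- is the first maximal eligible element in original order.
theorem pv_find_sorted (p : String × Int → Bool) (l : List (String × Int)) :
    ((PySem.List.sorted l (fun cw => cw.2) true).find? p)
      = List.foldl pvStepM none (l.filter p) := by
  induction l using List.reverseRecOn with
  | nil => simp [PySem.List.sorted_rev_eq_foldl_insertBy]
  | append_singleton l x ih =>
    have hsort : PySem.List.sorted (l ++ [x]) (fun cw => cw.2) true
        = PySem.List.insertBy (fun a b => decide (b.2 < a.2)) x
            (PySem.List.sorted l (fun cw => cw.2) true) := by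
      rw [PySem.List.sorted_rev_eq_foldl_insertBy, PySem.List.sorted_rev_eq_foldl_insertBy,
          List.foldl_append]
      rfl
    have hpair : (PySem.List.sorted l (fun cw => cw.2) true).Pairwise (fun a b => b.2 ≤ a.2) :=
      PySem.List.sorted_pairwise_rev l (fun cw => cw.2)
    rw [hsort, pv_find_insertBy p x _ hpair, ih, List.filter_append, List.foldl_append]
    by_cases hx : p x <;> simp [hx]

-- ===== VERDICT (by name: the statement is the Claim_ definition above) =====
theorem getMaxCatAndWeight_spec : Claim_equal_getMaxCatAndWeight := by
  intro cats gradeCats _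
  unfold Spec_getMaxCatAndWeight getMaxCatAndWeight getMaxCatAndWeight_alt
  rw [pv_find_sorted (fun cw => gradeCats.contains cw.1 && decide (cw.2 > 0)) cats]
  have := pv_a_eq_maxfold gradeCats cats
  unfold pvStepA at this
  exact this
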